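-- pv_equiv track=rewrite | github.com/Icscomp/Poliakov | fractions.py | exist_per
-- ===== SOURCE A (Python) =====
-- def exist_per (den: int) -> bool:
--     per = True
--     while den % 5 == 0:
--         den //= 5
--     while den % 2 == 0:
--         den //= 2
--     if den == 1:
--         per = False
--     return (per)
-- ===== SOURCE B (Python) =====
-- def exist_per(den: int) -> bool:
--     # 1/den repeats iff den is not a positive product of 2s and 5s, i.e. iff
--     # den does not divide a large enough power of 10; bit_length bounds the
--     # exponents of 2 and 5 in den, so one modular exponentiation decides it.
--     return not (den > 0 and pow(10, den.bit_length(), den) == 0)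
-- ===== Notes on version B (the rewrite author's own statement) =====
-- stated objective: simpler
-- what changed: Replaced A's two factor-stripping while-loops and final comparison with a single loop-free divisibility test: den has a repeating expansion iff den is not positive or does not divide ten raised to den.bit_length(), decided by one built-in three-argument pow (modular exponentiation).
-- outside the precondition, e.g. on exist_per(0): A does not finish within the time limit, B returns True
import Mathlib
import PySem

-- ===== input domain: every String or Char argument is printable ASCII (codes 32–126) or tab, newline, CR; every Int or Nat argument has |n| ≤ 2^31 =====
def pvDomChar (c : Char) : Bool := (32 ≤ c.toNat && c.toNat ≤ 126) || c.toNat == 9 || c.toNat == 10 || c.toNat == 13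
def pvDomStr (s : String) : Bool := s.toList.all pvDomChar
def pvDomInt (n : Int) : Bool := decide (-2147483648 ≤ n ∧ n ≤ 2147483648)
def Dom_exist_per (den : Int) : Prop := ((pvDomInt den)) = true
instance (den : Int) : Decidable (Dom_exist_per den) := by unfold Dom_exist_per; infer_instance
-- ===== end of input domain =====

-- B is loop-free: one divisibility test (modular exponentiation) replaces A's two stripping loops; simpler.

-- termination helper for A's loops: exact division by b ≥ 2 shrinks |den|
theorem pvDivLt (den b : Int) (hb : 2 ≤ b) (hd : b ∣ den) (h0 : den ≠ 0) :
    (PySem.Int.floordiv den b).natAbs < den.natAbs := by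
  obtain ⟨k, rfl⟩ := hd
  rw [PySem.Int.floordiv_eq_ediv_of_pos (by omega),
    Int.mul_ediv_cancel_left _ (by omega : b ≠ 0)]
  have hk0 : k ≠ 0 := by rintro rfl; simp at h0
  rw [Int.natAbs_mul]
  have h2 : 2 ≤ b.natAbs := by omega
  have h1 : 1 ≤ k.natAbs := by omega
  nlinarith

-- ===== PORT A =====
-- first while-loop of A: while den % 5 == 0: den //= 5   (the 'den ≠ 0' guard only makes the
-- recursion total; Python diverges at den = 0, which Pre_ excludes)
def strip5 (den : Int) : Int :=
  if h : den ≠ 0 ∧ PySem.Int.mod den 5 = 0 then strip5 (PySem.Int.floordiv den 5) else den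
  termination_by den.natAbs
  decreasing_by
    exact pvDivLt den 5 (by norm_num)
      ((PySem.Int.mod_eq_zero_iff_dvd den 5).mp h.2) h.1

-- second while-loop of A: while den % 2 == 0: den //= 2
def strip2 (den : Int) : Int :=
  if h : den ≠ 0 ∧ PySem.Int.mod den 2 = 0 then strip2 (PySem.Int.floordiv den 2) else den
  termination_by den.natAbs
  decreasing_by
    exact pvDivLt den 2 (by norm_num)
      ((PySem.Int.mod_eq_zero_iff_dvd den 2).mp h.2) h.1

def exist_per (den : Int) : Bool :=
  let per := true
  let den := strip5 den
  let den := strip2 den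
  let per := if den = 1 then false else per
  per

-- ===== PORT B =====
-- den.bit_length(): 0 for 0, otherwise number of bits of |den| (Python-exact)
def bitLength (n : Int) : Nat := if n = 0 then 0 else Nat.log2 n.natAbs + 1

-- Source B's three-argument pow with positive modulus den is '10^k mod den'; PySem.Int.mod is Python's %
def exist_per_alt (den : Int) : Bool :=
  !(decide (0 < den) && decide (PySem.Int.mod (10 ^ bitLength den) den = 0))

-- ===== PRECONDITION & SPEC =====
-- Pre_ excludes only a zero denominator, on which A's first while-loop never terminates.
def Pre_exist_per (den : Int) : Prop := den ≠ 0
instance (den : Int) : Decidable (Pre_exist_per den) := by unfold Pre_exist_per; infer_instance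
def pvWitness_exist_per : Int := (6)

def Spec_exist_per (den : Int) (out : Bool) : Prop := out = exist_per_alt den
instance (den : Int) (out : Bool) : Decidable (Spec_exist_per den out) := by unfold Spec_exist_per; infer_instance

-- ===== CLAIM (what is proved, stated in full; the proofs are below) =====
def Claim_equal_exist_per : Prop := ∀ (den : Int), Dom_exist_per den → Pre_exist_per den → Spec_exist_per den (exist_per den)

-- ===== LEMMAS AND PROOFS =====

theorem strip5_dvd (x : Int) (h0 : x ≠ 0) (h5 : (5:Int) ∣ x) : strip5 x = strip5 (x / 5) := by
  rw [strip5, dif_pos ⟨h0, (PySem.Int.mod_eq_zero_iff_dvd x 5).mpr h5⟩,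
    PySem.Int.floordiv_eq_ediv_of_pos (by norm_num)]

theorem strip5_not (x : Int) (h5 : ¬ (5:Int) ∣ x) : strip5 x = x := by
  rw [strip5, dif_neg]
  simp [PySem.Int.mod_eq_zero_iff_dvd, h5]

theorem strip2_dvd (x : Int) (h0 : x ≠ 0) (h2 : (2:Int) ∣ x) : strip2 x = strip2 (x / 2) := by
  rw [strip2, dif_pos ⟨h0, (PySem.Int.mod_eq_zero_iff_dvd x 2).mpr h2⟩,
    PySem.Int.floordiv_eq_ediv_of_pos (by norm_num)]

theorem strip2_not (x : Int) (h2 : ¬ (2:Int) ∣ x) : strip2 x = x := by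
  rw [strip2, dif_neg]
  simp [PySem.Int.mod_eq_zero_iff_dvd, h2]

theorem mul_ediv_five (k : Int) : (5 * k) / 5 = k := Int.mul_ediv_cancel_left _ (by norm_num)
theorem mul_ediv_two (k : Int) : (2 * k) / 2 = k := Int.mul_ediv_cancel_left _ (by norm_num)

-- backward helpers: stripping a pure 2^a·5^b yields 1
theorem strip5_pow (a : Nat) : ∀ b : Nat, strip5 ((2:Int)^a * 5^b) = 2^a := by
  intro b
  induction b with
  | zero =>
    rw [pow_zero, mul_one, strip5_not]
    intro hd
    have : (5:ℕ) ∣ 2^a := by exact_mod_cast hd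
    have := Nat.Prime.dvd_of_dvd_pow Nat.prime_five this
    omega
  | succ b ih =>
    have h0 : (2:Int)^a * 5^(b+1) ≠ 0 := by positivity
    rw [strip5_dvd _ h0 ⟨2^a * 5^b, by ring⟩,
      show (2:Int)^a * 5^(b+1) = 5 * (2^a * 5^b) by ring, mul_ediv_five, ih]

theorem strip2_pow : ∀ a : Nat, strip2 ((2:Int)^a) = 1 := by
  intro a
  induction a with
  | zero => rw [pow_zero, strip2_not 1 (by norm_num)]
  | succ a ih =>
    have h0 : (2:Int)^(a+1) ≠ 0 := by positivity
    rw [strip2_dvd _ h0 ⟨2^a, by ring⟩,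
      show (2:Int)^(a+1) = 2 * 2^a by ring, mul_ediv_two, ih]

-- forward direction by strong induction on |x|
theorem strip_char_aux : ∀ (n : Nat) (x : Int), x.natAbs ≤ n → x ≠ 0 →
    strip2 (strip5 x) = 1 → ∃ a b : Nat, x = 2^a * 5^b := by
  intro n
  induction n with
  | zero => intro x hx h0; omega
  | succ n ih =>
    intro x hx h0 h1
    by_cases h5 : (5:Int) ∣ x
    · obtain ⟨k, rfl⟩ := h5
      have hk0 : k ≠ 0 := by rintro rfl; simp at h0
      rw [strip5_dvd _ h0 ⟨k, rfl⟩, mul_ediv_five] at h1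
      obtain ⟨a, b, rfl⟩ := ih k (by simp [Int.natAbs_mul] at hx ⊢; omega) hk0 h1
      exact ⟨a, b + 1, by ring⟩
    · rw [strip5_not _ h5] at h1
      by_cases h2 : (2:Int) ∣ x
      · obtain ⟨k, rfl⟩ := h2
        have hk0 : k ≠ 0 := by rintro rfl; simp at h0
        have h5k : ¬ (5:Int) ∣ k := fun hd => h5 (hd.mul_left 2)
        rw [strip2_dvd _ h0 ⟨k, rfl⟩, mul_ediv_two] at h1
        have h1' : strip2 (strip5 k) = 1 := by rw [strip5_not _ h5k]; exact h1
        obtain ⟨a, b, rfl⟩ := ih k (by simp [Int.natAbs_mul] at hx ⊢; omega) hk0 h1'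
        exact ⟨a + 1, b, by ring⟩
      · rw [strip2_not _ h2] at h1
        exact ⟨0, 0, by simp [h1]⟩

theorem strip_char (x : Int) (h0 : x ≠ 0) :
    strip2 (strip5 x) = 1 ↔ ∃ a b : Nat, x = 2^a * 5^b := by
  constructor
  · exact strip_char_aux x.natAbs x le_rfl h0
  · rintro ⟨a, b, rfl⟩; rw [strip5_pow, strip2_pow]

-- the divisibility characterisation used by B
theorem dvd_char (x : Int) :
    (∃ a b : Nat, x = 2^a * 5^b) ↔ (0 < x ∧ x ∣ 10 ^ bitLength x) := by
  constructor
  · rintro ⟨a, b, rfl⟩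
    have hpos : (0:Int) < 2^a * 5^b := by positivity
    refine ⟨hpos, ?_⟩
    have hne : (2:ℕ)^a * 5^b ≠ 0 := by positivity
    set k := bitLength ((2:Int)^a * 5^b) with hk
    have hnat : ((2:Int)^a * 5^b).natAbs = 2^a * 5^b := by
      rw [Int.natAbs_mul, Int.natAbs_pow, Int.natAbs_pow]; rfl
    have hkk : k = Nat.log2 (2^a * 5^b) + 1 := by
      rw [hk, bitLength, if_neg (by positivity), hnat]
    have hlog := Nat.log2_eq_log_two (n := 2^a * 5^b)
    have ha : a ≤ Nat.log2 (2^a * 5^b) := by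
      rw [hlog]
      exact (Nat.le_log_iff_pow_le (by norm_num) hne).mpr
        (Nat.le_mul_of_pos_right _ (by positivity))
    have hb : b ≤ Nat.log2 (2^a * 5^b) := by
      rw [hlog]
      exact (Nat.le_log_iff_pow_le (by norm_num) hne).mpr
        (le_trans (Nat.pow_le_pow_left (by norm_num) b)
          (Nat.le_mul_of_pos_left _ (by positivity)))
    refine ⟨2^(k-a) * 5^(k-b), ?_⟩
    have hak : a ≤ k := by omega
    have hbk : b ≤ k := by omega
    rw [show (10:Int) = 2 * 5 by norm_num, mul_pow,
      show (2:Int)^a * 5^b * (2^(k-a) * 5^(k-b)) = (2^a * 2^(k-a)) * (5^b * 5^(k-b)) by ring,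
      ← pow_add, ← pow_add, Nat.add_sub_cancel' hak, Nat.add_sub_cancel' hbk]
  · rintro ⟨hpos, hdvd⟩
    have hnat : x.natAbs ∣ 2 ^ bitLength x * 5 ^ bitLength x := by
      have := Int.natAbs_dvd_natAbs.mpr hdvd
      have h10 : ((10:Int) ^ bitLength x).natAbs = 2 ^ bitLength x * 5 ^ bitLength x := by
        rw [Int.natAbs_pow, show ((10:Int)).natAbs = 10 from rfl,
          show (10:ℕ) = 2 * 5 by norm_num, mul_pow]
      rwa [h10] at this
    obtain ⟨k1, k2, hk1, hk2, hx⟩ := (Nat.dvd_mul).mp hnat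
    obtain ⟨a, _, rfl⟩ := (Nat.dvd_prime_pow Nat.prime_two).mp hk1
    obtain ⟨b, _, rfl⟩ := (Nat.dvd_prime_pow Nat.prime_five).mp hk2
    refine ⟨a, b, ?_⟩
    have : x = (x.natAbs : Int) := by omega
    rw [this, ← hx]; push_cast; ring

-- ===== VERDICT (by name: the statement is the Claim_ definition above) =====
theorem exist_per_spec : Claim_equal_exist_per := by
  intro den _ hpre
  unfold Spec_exist_per exist_per exist_per_alt
  have key : strip2 (strip5 den) = 1 ↔
      (0 < den ∧ PySem.Int.mod (10 ^ bitLength den) den = 0) := by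
    rw [strip_char den hpre, dvd_char, PySem.Int.mod_eq_zero_iff_dvd]
  by_cases h : strip2 (strip5 den) = 1
  · obtain ⟨h1, h2⟩ := key.mp h
    show (if strip2 (strip5 den) = 1 then false else true) = _
    rw [if_pos h, decide_eq_true h1, decide_eq_true h2]
    rfl
  · have := (not_iff_not.mpr key).mp h
    show (if strip2 (strip5 den) = 1 then false else true) = _
    rw [if_neg h]
    rcases Decidable.em (0 < den) with hp | hp <;>
      rcases Decidable.em (PySem.Int.mod (10 ^ bitLength den) den = 0) with hm | hm <;>
      simp_all
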